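-- pv_equiv track=rewrite | github.com/drxaero/modern-software-dev-assignments | week1/rag.py | YOUR_CONTEXT_PROVIDER
-- ===== SOURCE A (Python) =====
-- def YOUR_CONTEXT_PROVIDER(corpus: list[str]) -> list[str]:
--     """TODO: Select and return the relevant subset of documents from CORPUS for this task.
--
--     For example, return [] to simulate missing context, or [corpus[0]] to include the API docs.
--     """
--     if not corpus:
--         return []
--
--     keywords = [
--         "api reference",
--         "base url",
--         "x-api-key",
--         "get /users/{id}",
--         "name",
--     ]
--
--     ranked: list[tuple[int, str]] = []
--     for doc in corpus:
--         text = doc.lower()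
--         score = sum(1 for kw in keywords if kw in text)
--         if score > 0:
--             ranked.append((score, doc))
--
--     if not ranked:
--         return []
--
--     ranked.sort(key=lambda item: item[0], reverse=True)
--     top_score = ranked[0][0]
--     return [doc for score, doc in ranked if score == top_score]
-- ===== SOURCE B (Python) =====
-- def YOUR_CONTEXT_PROVIDER(corpus: list[str]) -> list[str]:
--     keywords = [
--         "api reference",
--         "base url",
--         "x-api-key",
--         "get /users/{id}",
--         "name",
--     ]
--     best = 0
--     result: list[str] = []
--     for doc in corpus:
--         text = doc.lower()
--         score = sum(1 for kw in keywords if kw in text)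
--         if score > best:
--             best = score
--             result = [doc]
--         elif score == best and best > 0:
--             result.append(doc)
--     return result
-- ===== Notes on version B (the rewrite author's own statement) =====
-- stated objective: simpler
-- what changed: replaces A's build-a-(score,doc)-list + stable reverse sort + top-score filter by a single left-to-right pass that maintains the running best score and the list of documents achieving it
import Mathlib
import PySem

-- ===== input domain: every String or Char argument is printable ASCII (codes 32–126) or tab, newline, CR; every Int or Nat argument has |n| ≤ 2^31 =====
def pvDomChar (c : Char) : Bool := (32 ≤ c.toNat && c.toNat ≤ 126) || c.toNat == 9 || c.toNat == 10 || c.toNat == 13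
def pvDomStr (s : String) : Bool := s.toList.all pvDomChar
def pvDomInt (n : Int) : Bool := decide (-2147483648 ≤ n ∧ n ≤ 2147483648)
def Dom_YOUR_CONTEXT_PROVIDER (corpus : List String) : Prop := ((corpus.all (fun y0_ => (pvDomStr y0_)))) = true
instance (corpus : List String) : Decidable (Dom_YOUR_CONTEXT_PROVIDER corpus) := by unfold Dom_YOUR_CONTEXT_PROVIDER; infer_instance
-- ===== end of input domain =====

-- B replaces A's (score, doc) list + stable reverse sort + top-score filter by one pass
-- keeping the running best score and its documents (objective: simpler; same results).

-- ===== PORT A =====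
-- the keyword list and the per-document score (both Pythons compute it identically)
def pvKeywords : List String :=
  ["api reference", "base url", "x-api-key", "get /users/{id}", "name"]

def pvScore (doc : String) : Int :=
  (pvKeywords.map (fun kw => if PySem.Str.isIn kw (PySem.Str.lower doc) then (1 : Int) else 0)).sum

def YOUR_CONTEXT_PROVIDER (corpus : List String) : List String :=
  if corpus = [] then []
  else
    let ranked : List (Int × String) :=
      corpus.foldl (fun acc doc =>
        if 0 < pvScore doc then acc ++ [(pvScore doc, doc)] else acc) []
    if ranked = [] then []
    else
      let sr := PySem.List.sorted ranked (fun item => item.1) true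
      let top := (sr.headD ((0 : Int), "")).1   -- ranked[0][0]; guarded by ranked ≠ []
      (sr.filter (fun p => decide (p.1 = top))).map (fun p => p.2)

-- ===== PORT B =====
def YOUR_CONTEXT_PROVIDER_alt (corpus : List String) : List String :=
  (corpus.foldl (fun st doc =>
      if st.1 < pvScore doc then (pvScore doc, [doc])
      else if pvScore doc = st.1 ∧ 0 < st.1 then (st.1, st.2 ++ [doc])
      else st)
    ((0 : Int), ([] : List String))).2

-- ===== PRECONDITION & SPEC =====
def Spec_YOUR_CONTEXT_PROVIDER (corpus : List String) (out : List String) : Prop := out = YOUR_CONTEXT_PROVIDER_alt corpus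
instance (corpus : List String) (out : List String) : Decidable (Spec_YOUR_CONTEXT_PROVIDER corpus out) := by unfold Spec_YOUR_CONTEXT_PROVIDER; infer_instance

-- ===== CLAIM (what is proved, stated in full; the proofs are below) =====
def Claim_equal_YOUR_CONTEXT_PROVIDER : Prop := ∀ (corpus : List String), Dom_YOUR_CONTEXT_PROVIDER corpus → Spec_YOUR_CONTEXT_PROVIDER corpus (YOUR_CONTEXT_PROVIDER corpus)

-- ===== LEMMAS AND PROOFS =====

-- running maximal score (0 if no document, 0 if all scores are 0)
def pvMx (xs : List String) : Int := xs.foldl (fun b d => max b (pvScore d)) 0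

-- the common specification: documents achieving the positive maximal score, in order
def pvSpecF (xs : List String) : List String :=
  if 0 < pvMx xs then xs.filter (fun d => decide (pvScore d = pvMx xs)) else []

theorem pvMx_nonneg (xs : List String) : 0 ≤ pvMx xs :=
  (PySem.List.le_foldl_max_int xs pvScore 0).1

theorem le_pvMx (xs : List String) {d : String} (hd : d ∈ xs) : pvScore d ≤ pvMx xs :=
  (PySem.List.le_foldl_max_int xs pvScore 0).2 d hd

theorem pvMx_append (xs : List String) (x : String) :
    pvMx (xs ++ [x]) = max (pvMx xs) (pvScore x) := by
  simp [pvMx, List.foldl_append]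

theorem pvMx_le (xs : List String) {t : Int} (h0 : 0 ≤ t)
    (h : ∀ d ∈ xs, pvScore d ≤ t) : pvMx xs ≤ t := by
  induction xs using List.reverseRecOn with
  | nil => simpa [pvMx] using h0
  | append_singleton xs x ih =>
    rw [pvMx_append]
    exact max_le (ih fun d hd => h d (by simp [hd])) (h x (by simp))

-- B's loop computes exactly (pvMx, pvSpecF)
theorem alt_fold_eq (xs : List String) :
    xs.foldl (fun st doc =>
      if st.1 < pvScore doc then (pvScore doc, [doc])
      else if pvScore doc = st.1 ∧ 0 < st.1 then (st.1, st.2 ++ [doc])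
      else st) ((0 : Int), ([] : List String)) = (pvMx xs, pvSpecF xs) := by
  induction xs using List.reverseRecOn with
  | nil => simp [pvMx, pvSpecF]
  | append_singleton xs x ih =>
    rw [List.foldl_append, ih]
    simp only [List.foldl_cons, List.foldl_nil]
    by_cases h1 : pvMx xs < pvScore x
    · have hpos : 0 < pvScore x := lt_of_le_of_lt (pvMx_nonneg xs) h1
      have hfil : xs.filter (fun d => decide (pvScore d = pvScore x)) = [] := by
        apply List.filter_eq_nil_iff.mpr
        intro d hd
        simp only [decide_eq_true_eq]
        exact fun hEq => absurd h1 (not_lt.mpr (hEq ▸ le_pvMx xs hd))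
      simp [h1, pvMx_append, max_eq_right (le_of_lt h1), pvSpecF, hpos,
        List.filter_append, hfil]
    · by_cases h2 : pvScore x = pvMx xs ∧ 0 < pvMx xs
      · simp only [h2]
        have hM : pvMx (xs ++ [x]) = pvMx xs := by
          rw [pvMx_append, max_eq_left (le_of_eq h2.1)]
        simp [pvSpecF, hM, h2.2, List.filter_append, h2.1]
      · simp only [h1, if_false, h2, if_false]
        have hle : pvScore x ≤ pvMx xs := not_lt.mp h1
        have hM : pvMx (xs ++ [x]) = pvMx xs := by
          rw [pvMx_append, max_eq_left hle]
        by_cases hpos : 0 < pvMx xs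
        · have hne : pvScore x ≠ pvMx xs := fun hEq => h2 ⟨hEq, hpos⟩
          simp [pvSpecF, hM, hpos, List.filter_append, hne]
        · simp [pvSpecF, hM, hpos]

-- stability of the filter at a fixed key value under insertBy on a reverse-sorted list
theorem filter_insertBy {α : Type} (key : α → Int) (v : Int) (x : α) :
    ∀ (ys : List α), ys.Pairwise (fun a b => key b ≤ key a) →
      (PySem.List.insertBy (fun a b => decide (key b < key a)) x ys).filter
          (fun z => decide (key z = v))
        = ys.filter (fun z => decide (key z = v)) ++ (if key x = v then [x] else []) := by
  intro ys
  induction ys with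
  | nil =>
    intro _
    by_cases hv : key x = v <;> simp [PySem.List.insertBy, hv]
  | cons y ys ih =>
    intro hp
    by_cases hb : key y < key x
    · simp only [PySem.List.insertBy, hb, decide_true, if_true]
      by_cases hv : key x = v
      · have hnil : (y :: ys).filter (fun z => decide (key z = v)) = [] := by
          apply List.filter_eq_nil_iff.mpr
          intro z hz
          simp only [decide_eq_true_eq]
          rcases List.mem_cons.mp hz with rfl | hz
          · omega
          · have := (List.pairwise_cons.mp hp).1 z hz; omega
        simp [hv, hnil]
      · simp [List.filter_cons, hv]
    · simp only [PySem.List.insertBy, hb, decide_false, Bool.false_eq_true, if_false]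
      rw [List.filter_cons, List.filter_cons,
        ih (List.pairwise_cons.mp hp).2]
      by_cases hy : key y = v <;> simp [hy]

-- stability: filtering the reverse-sorted list at any key value gives the original filter
theorem filter_sorted_rev {α : Type} (key : α → Int) (v : Int) (xs : List α) :
    (PySem.List.sorted xs key true).filter (fun z => decide (key z = v))
      = xs.filter (fun z => decide (key z = v)) := by
  induction xs using List.reverseRecOn with
  | nil => simp [PySem.List.sorted_rev_eq_foldl_insertBy]
  | append_singleton xs x ih =>
    have hstep : PySem.List.sorted (xs ++ [x]) key true
        = PySem.List.insertBy (fun a b => decide (key b < key a)) x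
            (PySem.List.sorted xs key true) := by
      rw [PySem.List.sorted_rev_eq_foldl_insertBy, PySem.List.sorted_rev_eq_foldl_insertBy,
        List.foldl_append]
      simp
    rw [hstep, filter_insertBy key v x _ (PySem.List.sorted_pairwise_rev xs key), ih,
      List.filter_append]
    by_cases hv : key x = v <;> simp [hv]

theorem port_A_eq_specF (corpus : List String) :
    YOUR_CONTEXT_PROVIDER corpus = pvSpecF corpus := by
  unfold YOUR_CONTEXT_PROVIDER
  by_cases hc : corpus = []
  · simp [hc, pvSpecF, pvMx]
  · simp only [hc, if_false]
    have hranked : corpus.foldl (fun acc doc =>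
        if 0 < pvScore doc then acc ++ [(pvScore doc, doc)] else acc) []
        = ((corpus.filter (fun d => decide (0 < pvScore d))).map (fun d => (pvScore d, d))) := by
      have hfun : (fun (acc : List (Int × String)) doc =>
          if 0 < pvScore doc then acc ++ [(pvScore doc, doc)] else acc)
          = (fun acc doc =>
          if (fun d => decide (0 < pvScore d)) doc = true then
            acc ++ [(fun d => (pvScore d, d)) doc] else acc) := by
        funext acc d; simp
      rw [hfun, PySem.List.foldl_append_if]
      simp
    rw [hranked]
    by_cases hnil : corpus.filter (fun d => decide (0 < pvScore d)) = []
    · -- no document scores: both sides are []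
      have hall : ∀ d ∈ corpus, pvScore d ≤ 0 := by
        intro d hd
        by_contra hpos
        have hmemf : d ∈ corpus.filter (fun d => decide (0 < pvScore d)) :=
          List.mem_filter.mpr ⟨hd, by simp; omega⟩
        simp [hnil] at hmemf
      have hM : ¬ 0 < pvMx corpus := not_lt.mpr (pvMx_le corpus le_rfl hall)
      simp [hnil, pvSpecF, hM]
    · have hrne : ((corpus.filter (fun d => decide (0 < pvScore d))).map
          (fun d => (pvScore d, d))) ≠ [] := by simpa using hnil
      simp only [hrne, if_false]
      set ranked := (corpus.filter (fun d => decide (0 < pvScore d))).map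
          (fun d => (pvScore d, d)) with hrdef
      set sr := PySem.List.sorted ranked (fun item : Int × String => item.1) true with hsr
      have hsrne : sr ≠ [] := by
        rw [hsr]
        simpa [PySem.List.sorted_eq_nil_iff] using hrne
      obtain ⟨m, t, hmt⟩ := List.exists_cons_of_ne_nil hsrne
      have htop : (sr.headD ((0 : Int), "")).1 = m.1 := by rw [hmt]; rfl
      -- m is in ranked, so m.1 = pvScore d₀ for a scoring document d₀ ∈ corpus
      have hmem : m ∈ ranked := by
        rw [← PySem.List.mem_sorted ranked (fun item : Int × String => item.1) true, ← hsr,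
          hmt]
        exact List.mem_cons_self
      obtain ⟨d0, hd0, hmd0⟩ := List.mem_map.mp hmem
      have hd0c : d0 ∈ corpus := (List.mem_filter.mp hd0).1
      have hd0pos : 0 < pvScore d0 := by
        have := (List.mem_filter.mp hd0).2; simpa using this
      have hm1 : m.1 = pvScore d0 := by rw [← hmd0]
      -- the head key is the maximal score
      have htopmax : m.1 = pvMx corpus := by
        have hub : ∀ y ∈ ranked, y.1 ≤ m.1 :=
          PySem.List.key_head_sorted_rev_ge ranked (fun item : Int × String => item.1)
            (hsr ▸ hmt)
        have h1 : m.1 ≤ pvMx corpus := hm1 ▸ le_pvMx corpus hd0c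
        have h2 : pvMx corpus ≤ m.1 := by
          apply pvMx_le corpus (le_of_lt (hm1 ▸ hd0pos))
          intro d hd
          by_cases hp : 0 < pvScore d
          · exact hub (pvScore d, d)
              (List.mem_map.mpr ⟨d, List.mem_filter.mpr ⟨hd, by simpa using hp⟩, rfl⟩)
          · exact le_of_lt (lt_of_le_of_lt (not_lt.mp hp) (hm1 ▸ hd0pos))
        omega
      have hMpos : 0 < pvMx corpus := htopmax ▸ (hm1 ▸ hd0pos)
      rw [htop, htopmax, hsr, filter_sorted_rev (fun item : Int × String => item.1)
        (pvMx corpus) ranked, hrdef]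
      rw [List.filter_map, List.map_map]
      simp only [Function.comp_def]
      rw [List.filter_filter]
      rw [List.filter_congr (q := fun d => decide (pvScore d = pvMx corpus))
        (fun d _ => by
          by_cases hEq : pvScore d = pvMx corpus
          · have h0 : 0 < pvScore d := hEq ▸ hMpos
            simp [hEq]
            omega
          · simp [hEq])]
      simp [pvSpecF, hMpos]

theorem port_B_eq_specF (corpus : List String) :
    YOUR_CONTEXT_PROVIDER_alt corpus = pvSpecF corpus := by
  unfold YOUR_CONTEXT_PROVIDER_alt
  rw [alt_fold_eq]

-- ===== VERDICT (by name: the statement is the Claim_ definition above) =====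
theorem YOUR_CONTEXT_PROVIDER_spec : Claim_equal_YOUR_CONTEXT_PROVIDER := by
  intro corpus _
  unfold Spec_YOUR_CONTEXT_PROVIDER
  rw [port_A_eq_specF, port_B_eq_specF]
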